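-- pv_equiv track=rewrite | github.com/NickD-01/project-11-part-2NickToKopila | project 11/project 11_mailing.py | group_by_day
-- ===== SOURCE A (Python) =====
-- def group_by_day(timeslots):
--     # Groups hourly forecast data by day.
--
--     days_data = {}
--     for timeslot in timeslots:
--         timeslot_date = timeslot.get("dt_txt")[0:10]
--         if timeslot_date not in days_data:
--             days_data[timeslot_date] = []
--         days_data[timeslot_date].append(timeslot)
--
--     return days_data
-- ===== SOURCE B (Python) =====
-- def group_by_day(timeslots):
--     # Two-pass: collect the ordered distinct date prefixes, then build each
--     # day's list by filtering the timeslots for that date.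
--     dates = [t.get("dt_txt")[0:10] for t in timeslots]
--     return {d: [t for t, dt in zip(timeslots, dates) if dt == d]
--             for d in dict.fromkeys(dates)}
-- ===== Notes on version B (the rewrite author's own statement) =====
-- stated objective: alternative
-- what changed: Replaced A's single-pass dict build with membership check and in-place append by a two-pass scheme: compute all date prefixes, take the ordered distinct dates (dict.fromkeys), and build each day's list by filtering the timeslots for that date.
import Mathlib
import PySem

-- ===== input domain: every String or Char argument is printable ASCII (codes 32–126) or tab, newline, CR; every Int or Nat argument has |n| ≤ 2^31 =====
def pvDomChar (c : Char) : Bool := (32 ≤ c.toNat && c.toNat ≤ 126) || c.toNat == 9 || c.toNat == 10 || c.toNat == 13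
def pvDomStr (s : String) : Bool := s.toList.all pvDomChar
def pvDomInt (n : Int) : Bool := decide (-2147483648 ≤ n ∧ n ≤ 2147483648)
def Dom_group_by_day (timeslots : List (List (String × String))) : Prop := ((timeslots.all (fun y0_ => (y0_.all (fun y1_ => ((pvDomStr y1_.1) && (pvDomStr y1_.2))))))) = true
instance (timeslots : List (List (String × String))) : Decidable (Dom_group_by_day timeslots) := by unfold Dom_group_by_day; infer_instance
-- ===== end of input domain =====

-- B replaces A's incremental membership-check-and-append dict loop by a two-pass
-- scheme (ordered distinct date keys, then one filter per key): an alternative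
-- decomposition of the same grouping, not claimed faster.


-- ===== PORT A =====
-- timeslot.get("dt_txt")[0:10]; `none` from get? is Python's TypeError (None[0:10]), excluded by Pre_,
-- so the `.getD ""` default is never taken on admitted inputs.
def pvKey (t : List (String × String)) : String :=
  (((PySem.Dict.mk t).get? "dt_txt").map (fun s => PySem.Str.slice s (some 0) (some 10))).getD ""

def group_by_day (timeslots : List (List (String × String))) : List (String × List (List (String × String))) :=
  (timeslots.foldl (fun days_data timeslot =>
      let timeslot_date := pvKey timeslot
      let days_data := if days_data.contains timeslot_date then days_data
                       else days_data.insert timeslot_date []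
      days_data.modify timeslot_date [] (fun xs => xs ++ [timeslot]))
    (PySem.Dict.mk [])).items

-- ===== PORT B =====
def group_by_day_alt (timeslots : List (List (String × String))) : List (String × List (List (String × String))) :=
  let dates := timeslots.map pvKey
  (PySem.List.dedup dates).map (fun d =>
    (d, ((timeslots.zip dates).filter (fun p => p.2 == d)).map (fun p => p.1)))

-- ===== PRECONDITION & SPEC =====
-- Pre_ excludes exactly the timeslots lacking key "dt_txt", on which A raises TypeError (None[0:10]).
def Pre_group_by_day (timeslots : List (List (String × String))) : Prop :=
  ∀ t ∈ timeslots, ((PySem.Dict.mk t).get? "dt_txt").isSome = true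
instance (timeslots : List (List (String × String))) : Decidable (Pre_group_by_day timeslots) := by unfold Pre_group_by_day; infer_instance
def pvWitness_group_by_day : (List (List (String × String))) :=
  [[("dt_txt", "2023-01-02 03:00:00")], [("dt_txt", "2023-01-02 06:00:00"), ("temp", "7")]]

def Spec_group_by_day (timeslots : List (List (String × String))) (out : List (String × List (List (String × String)))) : Prop := out = group_by_day_alt timeslots
instance (timeslots : List (List (String × String))) (out : List (String × List (List (String × String)))) : Decidable (Spec_group_by_day timeslots out) := by unfold Spec_group_by_day; infer_instance

-- ===== CLAIM (what is proved, stated in full; the proofs are below) =====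
def Claim_equal_group_by_day : Prop := ∀ (timeslots : List (List (String × String))), Dom_group_by_day timeslots → Pre_group_by_day timeslots → Spec_group_by_day timeslots (group_by_day timeslots)

-- ===== LEMMAS AND PROOFS =====

-- B's zipped comprehension is a plain filter of the timeslots
theorem pv_zip_filter (ts : List (List (String × String))) (d : String) :
    ((ts.zip (ts.map pvKey)).filter (fun p => p.2 == d)).map (fun p => p.1)
      = ts.filter (fun t => pvKey t == d) := by
  induction ts with
  | nil => rfl
  | cons t ts ih =>
    simp only [List.map_cons, List.zip_cons_cons, List.filter_cons]
    by_cases h : pvKey t == d <;> simp [h, ih]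

theorem pv_find?_map (l : List String) (g : String → List (List (String × String))) (k : String) :
    List.find? (fun p => p.1 == k) (l.map (fun d => (d, g d)))
      = (l.find? (fun d => d == k)).map (fun d => (d, g d)) := by
  induction l with
  | nil => rfl
  | cons a l ih =>
    by_cases h : a == k <;> simp [List.find?, h, ih]

theorem pv_find?_self (l : List String) (k : String) (h : k ∈ l) :
    l.find? (fun d => d == k) = some k := by
  induction l with
  | nil => cases h
  | cons a l ih =>
    by_cases ha : a == k
    · have : a = k := beq_iff_eq.mp ha
      simp [List.find?, this]
    · have hk : k ∈ l := by
        rcases List.mem_cons.mp h with rfl | h'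
        · exact absurd (beq_self_eq_true k) ha
        · exact h'
      simp [List.find?, ha, ih hk]

theorem pv_invariant (ts : List (List (String × String))) :
    (ts.foldl (fun days_data timeslot =>
        let timeslot_date := pvKey timeslot
        let days_data := if days_data.contains timeslot_date then days_data
                         else days_data.insert timeslot_date []
        days_data.modify timeslot_date [] (fun xs => xs ++ [timeslot]))
      (PySem.Dict.mk []))
    = PySem.Dict.mk ((PySem.Set.ofList (ts.map pvKey)).map
        (fun d => (d, ts.filter (fun t' => pvKey t' == d)))) := by
  induction ts using List.reverseRecOn with
  | nil => rfl
  | append_singleton ts t ih =>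
    rw [List.foldl_append, List.foldl_cons, List.foldl_nil, ih]
    dsimp only
    have hset : PySem.Set.ofList ((ts ++ [t]).map pvKey)
        = (PySem.Set.ofList (ts.map pvKey)).add (pvKey t) := by
      simp [PySem.Set.ofList, List.foldl_append]
    have hfilter : ∀ d : String, (ts ++ [t]).filter (fun t' => pvKey t' == d)
        = ts.filter (fun t' => pvKey t' == d) ++ (if pvKey t == d then [t] else []) := by
      intro d
      rw [List.filter_append]
      by_cases h : pvKey t == d <;> simp [h]
    by_cases hmem : pvKey t ∈ ts.map pvKey
    · -- the day is already present: A appends to its entry, B's table gains the slot in place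
      have hmemS : pvKey t ∈ PySem.Set.ofList (ts.map pvKey) :=
        (PySem.Set.mem_ofList _ _).mpr hmem
      have hcont : (PySem.Dict.mk ((PySem.Set.ofList (ts.map pvKey)).map
          (fun d => (d, ts.filter (fun t' => pvKey t' == d))))).contains (pvKey t) = true := by
        simp only [PySem.Dict.contains, List.any_eq_true]
        exact ⟨(pvKey t, ts.filter (fun t' => pvKey t' == pvKey t)),
          List.mem_map_of_mem hmemS, by simp⟩
      have hget : (PySem.Dict.mk ((PySem.Set.ofList (ts.map pvKey)).map
          (fun d => (d, ts.filter (fun t' => pvKey t' == d))))).getD (pvKey t) []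
          = ts.filter (fun t' => pvKey t' == pvKey t) := by
        simp only [PySem.Dict.getD, PySem.Dict.get?]
        rw [pv_find?_map, pv_find?_self _ _ hmemS]
        rfl
      have hadd : (PySem.Set.ofList (ts.map pvKey)).add (pvKey t)
          = PySem.Set.ofList (ts.map pvKey) := by
        simp only [PySem.Set.add, PySem.Set.contains]
        rw [if_pos (by simpa using hmemS)]
      rw [if_pos hcont]
      simp only [PySem.Dict.modify, hget, PySem.Dict.insert, hcont, if_true, hset, hadd]
      refine congrArg PySem.Dict.mk ?_
      rw [List.map_map]
      refine List.map_congr_left (fun d _ => ?_)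
      by_cases hdk : d = pvKey t
      · subst hdk; simp [hfilter]
      · have h1 : (d == pvKey t) = false := beq_eq_false_iff_ne.mpr hdk
        have h2 : (pvKey t == d) = false := beq_eq_false_iff_ne.mpr (Ne.symm hdk)
        simp [Function.comp, h1, hfilter, h2]
    · -- a new day: A inserts an empty entry at the end and fills it, B's table grows by one key
      have hkeys : ∀ p ∈ (PySem.Set.ofList (ts.map pvKey)).map
          (fun d => (d, ts.filter (fun t' => pvKey t' == d))), (p.1 == pvKey t) = false := by
        intro p hp
        rcases List.mem_map.mp hp with ⟨d, hd, rfl⟩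
        exact beq_eq_false_iff_ne.mpr
          (fun h => hmem (h ▸ (PySem.Set.mem_ofList _ _).mp hd))
      have hcont : (PySem.Dict.mk ((PySem.Set.ofList (ts.map pvKey)).map
          (fun d => (d, ts.filter (fun t' => pvKey t' == d))))).contains (pvKey t) = false := by
        simp only [PySem.Dict.contains, List.any_eq_false]
        intro p hp; simp [hkeys p hp]
      have hnone : List.find? (fun p => p.1 == pvKey t)
          ((PySem.Set.ofList (ts.map pvKey)).map
            (fun d => (d, ts.filter (fun t' => pvKey t' == d)))) = none :=
        List.find?_eq_none.mpr (fun p hp => by simp [hkeys p hp])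
      rw [if_neg (by simp [hcont])]
      have hins : (PySem.Dict.mk ((PySem.Set.ofList (ts.map pvKey)).map
          (fun d => (d, ts.filter (fun t' => pvKey t' == d))))).insert (pvKey t) []
          = PySem.Dict.mk (((PySem.Set.ofList (ts.map pvKey)).map
              (fun d => (d, ts.filter (fun t' => pvKey t' == d)))) ++ [(pvKey t, [])]) := by
        simp [PySem.Dict.insert, hcont]
      rw [hins]
      have hget2 : (PySem.Dict.mk (((PySem.Set.ofList (ts.map pvKey)).map
          (fun d => (d, ts.filter (fun t' => pvKey t' == d)))) ++ [(pvKey t, [])])).getD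
            (pvKey t) [] = [] := by
        simp [PySem.Dict.getD, PySem.Dict.get?, List.find?_append, hnone]
      have hcont2 : (PySem.Dict.mk (((PySem.Set.ofList (ts.map pvKey)).map
          (fun d => (d, ts.filter (fun t' => pvKey t' == d)))) ++ [(pvKey t, [])])).contains
            (pvKey t) = true := by
        simp [PySem.Dict.contains]
      simp only [PySem.Dict.modify, hget2, PySem.Dict.insert, hcont2, if_true,
        List.nil_append, hset]
      refine congrArg PySem.Dict.mk ?_
      have haddk : (PySem.Set.ofList (ts.map pvKey)).add (pvKey t)
          = PySem.Set.ofList (ts.map pvKey) ++ [pvKey t] := by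
        simp only [PySem.Set.add, PySem.Set.contains]
        rw [if_neg (by simpa using fun h => hmem ((PySem.Set.mem_ofList _ _).mp h))]
      rw [List.map_append, haddk, List.map_append]
      refine congrArg₂ (· ++ ·) ?_ ?_
      · rw [List.map_map]
        refine List.map_congr_left (fun d hd => ?_)
        have hdk : d ≠ pvKey t := fun h => hmem (h ▸ (PySem.Set.mem_ofList _ _).mp hd)
        have h1 : (d == pvKey t) = false := beq_eq_false_iff_ne.mpr hdk
        have h2 : (pvKey t == d) = false := beq_eq_false_iff_ne.mpr (Ne.symm hdk)
        simp [Function.comp, h1, hfilter d, h2]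
      · have hnilk : ts.filter (fun t' => pvKey t' == pvKey t) = [] :=
          List.filter_eq_nil_iff.mpr (fun t' ht' =>
            by simp [beq_eq_false_iff_ne.mpr
              (fun h : pvKey t' = pvKey t => hmem (h ▸ List.mem_map_of_mem ht'))])
        simp [hfilter, hnilk]

theorem pv_alt_eq (ts : List (List (String × String))) :
    group_by_day_alt ts
      = (PySem.Set.ofList (ts.map pvKey)).map
          (fun d => (d, ts.filter (fun t' => pvKey t' == d))) := by
  simp only [group_by_day_alt, PySem.List.dedup]
  exact List.map_congr_left (fun d _ => by rw [pv_zip_filter])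

-- ===== VERDICT (by name: the statement is the Claim_ definition above) =====
theorem group_by_day_spec : Claim_equal_group_by_day := by
  intro ts _ _
  unfold Spec_group_by_day
  rw [group_by_day, pv_invariant, pv_alt_eq]
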